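-- pv_equiv track=rewrite | github.com/AdayahLogic/FORGE | core/tool_registry.py | get_tools_for_agent
-- ===== SOURCE A (Python) =====
-- from typing import Any
--
-- TOOL_REGISTRY: dict[str, dict[str, Any]] = {
--     "terminal": {
--         "implemented": True,
--         "status": "active",
--         "category": "execution",
--         "allowed_agents": ["terminal"],
--         "human_review_recommended": True,
--         "description": "Runs allowlisted terminal commands and records execution results.",
--     },
--     "browser_research": {
--         "implemented": True,
--         "status": "active",
--         "category": "research",
--         "allowed_agents": ["browser_research"],
--         "human_review_recommended": True,
--         "description": "Launches safe research URLs and writes browser research reports.",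
--     },
--     "file_modification": {
--         "implemented": True,
--         "status": "active",
--         "category": "file_ops",
--         "allowed_agents": ["file_modification"],
--         "human_review_recommended": True,
--         "description": "Performs controlled append/update operations on project files.",
--     },
--     "diff_patch": {
--         "implemented": True,
--         "status": "active",
--         "category": "file_ops",
--         "allowed_agents": ["diff_patch"],
--         "human_review_recommended": True,
--         "description": "Applies approval-gated diff/patch operations.",
--     },
--     "tool_execution": {
--         "implemented": True,
--         "status": "active",
--         "category": "execution",
--         "allowed_agents": ["tool_execution"],
--         "human_review_recommended": True,
--         "description": "Runs structured internal tool sequences and writes tool execution reports.",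
--     },
--     "deployment": {
--         "implemented": False,
--         "status": "planned",
--         "category": "deployment",
--         "allowed_agents": [],
--         "human_review_recommended": True,
--         "description": "Deployment and release tooling (planned).",
--     },
--     "billing_admin": {
--         "implemented": False,
--         "status": "planned",
--         "category": "admin",
--         "allowed_agents": [],
--         "human_review_recommended": True,
--         "description": "Billing and subscription administration (planned).",
--     },
--     "analytics_export": {
--         "implemented": False,
--         "status": "planned",
--         "category": "analytics",
--         "allowed_agents": [],
--         "human_review_recommended": True,
--         "description": "Analytics export and reporting (planned).",
--     },
-- }
--
-- def get_tools_for_agent(agent_name: str | None) -> list[str]: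
--     """Return sorted list of tool names the given agent is allowed to use."""
--     if not agent_name:
--         return []
--     agent = (agent_name or "").strip().lower()
--     return sorted([
--         name for name, meta in TOOL_REGISTRY.items()
--         if agent in [a.lower() for a in meta.get("allowed_agents", [])]
--     ])
-- ===== SOURCE B (Python) =====
-- # B: inverted index agent -> pre-sorted tool names, built once from the only
-- # data the function needs (tool -> allowed_agents); each call is one dict lookup.
--
-- TOOL_ALLOWED_AGENTS: dict[str, list[str]] = {
--     "terminal": ["terminal"],
--     "browser_research": ["browser_research"],
--     "file_modification": ["file_modification"],
--     "diff_patch": ["diff_patch"],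
--     "tool_execution": ["tool_execution"],
--     "deployment": [],
--     "billing_admin": [],
--     "analytics_export": [],
-- }
--
-- _idx: dict[str, list[str]] = {}
-- for _tool, _agents in TOOL_ALLOWED_AGENTS.items():
--     for _a in _agents:
--         _idx.setdefault(_a.lower(), []).append(_tool)
--
-- AGENT_TO_TOOLS: dict[str, list[str]] = {a: sorted(ts) for a, ts in _idx.items()}
--
--
-- def get_tools_for_agent(agent_name: str | None) -> list[str]:
--     """Return sorted list of tool names the given agent is allowed to use."""
--     if not agent_name:
--         return []
--     return list(AGENT_TO_TOOLS.get(agent_name.strip().lower(), []))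
-- ===== Notes on version B (the rewrite author's own statement) =====
-- stated objective: faster
-- what changed: Replaces the per-call scan over every registry entry (lowercasing each allowed_agents list and sorting on each call) with a module-level inverted index mapping lowercased agent names to pre-sorted tool-name lists, so each call is a single dict lookup with no scan and no sort.
import Mathlib
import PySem

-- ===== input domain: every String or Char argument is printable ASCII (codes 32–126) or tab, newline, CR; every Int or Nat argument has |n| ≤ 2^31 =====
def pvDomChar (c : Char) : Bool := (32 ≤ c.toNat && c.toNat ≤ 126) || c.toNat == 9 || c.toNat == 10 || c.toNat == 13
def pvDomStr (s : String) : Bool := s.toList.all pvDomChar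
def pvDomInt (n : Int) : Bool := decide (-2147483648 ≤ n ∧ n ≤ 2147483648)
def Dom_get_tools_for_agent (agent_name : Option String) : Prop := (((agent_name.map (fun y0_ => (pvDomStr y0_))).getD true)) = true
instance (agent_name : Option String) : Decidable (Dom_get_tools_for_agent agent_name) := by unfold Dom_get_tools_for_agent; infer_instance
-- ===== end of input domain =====

-- B replaces A's per-call scan-and-sort of the whole registry with an inverted index
-- (lowercased agent → pre-sorted tool names) built once; each call is one dict lookup.

-- ===== PORT A =====
-- Python TOOL_REGISTRY values are heterogeneous dicts with a fixed key set;
-- ported as a structure (meta.get("allowed_agents", []) → .allowed_agents: the key is always present).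
structure ToolMeta where
  implemented : Bool
  status : String
  category : String
  allowed_agents : List String
  human_review_recommended : Bool
  description : String
deriving DecidableEq, Repr

def TOOL_REGISTRY : List (String × ToolMeta) :=
  [ ("terminal", ⟨true, "active", "execution", ["terminal"], true,
      "Runs allowlisted terminal commands and records execution results."⟩),
    ("browser_research", ⟨true, "active", "research", ["browser_research"], true,
      "Launches safe research URLs and writes browser research reports."⟩),
    ("file_modification", ⟨true, "active", "file_ops", ["file_modification"], true,
      "Performs controlled append/update operations on project files."⟩),
    ("diff_patch", ⟨true, "active", "file_ops", ["diff_patch"], true,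
      "Applies approval-gated diff/patch operations."⟩),
    ("tool_execution", ⟨true, "active", "execution", ["tool_execution"], true,
      "Runs structured internal tool sequences and writes tool execution reports."⟩),
    ("deployment", ⟨false, "planned", "deployment", [], true,
      "Deployment and release tooling (planned)."⟩),
    ("billing_admin", ⟨false, "planned", "admin", [], true,
      "Billing and subscription administration (planned)."⟩),
    ("analytics_export", ⟨false, "planned", "analytics", [], true,
      "Analytics export and reporting (planned)."⟩) ]

def get_tools_for_agent (agent_name : Option String) : List String :=
  match agent_name with
  | none => []
  | some s =>
    if s = "" then []                                   -- `if not agent_name`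
    else
      let agent := PySem.Str.lower (PySem.Str.strip s)
      PySem.List.sorted
        ((TOOL_REGISTRY.filter
            (fun p => (p.2.allowed_agents.map PySem.Str.lower).contains agent)).map
          (fun p => p.1))
        (fun x => x)

-- ===== PORT B =====
-- B carries only the data the function needs: tool → allowed agents.
def TOOL_ALLOWED_AGENTS : List (String × List String) :=
  [ ("terminal", ["terminal"]),
    ("browser_research", ["browser_research"]),
    ("file_modification", ["file_modification"]),
    ("diff_patch", ["diff_patch"]),
    ("tool_execution", ["tool_execution"]),
    ("deployment", []),
    ("billing_admin", []),
    ("analytics_export", []) ]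

-- the build loop: _idx.setdefault(a.lower(), []).append(tool)
def pvIdx : PySem.Dict String (List String) :=
  TOOL_ALLOWED_AGENTS.foldl
    (fun d p => p.2.foldl
      (fun d a => d.modify (PySem.Str.lower a) [] (fun ts => ts ++ [p.1])) d)
    PySem.Dict.empty

-- {a: sorted(ts) for a, ts in _idx.items()}
def AGENT_TO_TOOLS : PySem.Dict String (List String) :=
  PySem.Dict.mk (pvIdx.items.map (fun p => (p.1, PySem.List.sorted p.2 (fun x => x))))

def get_tools_for_agent_alt (agent_name : Option String) : List String :=
  match agent_name with
  | none => []
  | some s =>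
    if s = "" then []
    else AGENT_TO_TOOLS.getD (PySem.Str.lower (PySem.Str.strip s)) []   -- list(...) copy = identity

-- ===== PRECONDITION & SPEC =====
def Spec_get_tools_for_agent (agent_name : Option String) (out : List String) : Prop := out = get_tools_for_agent_alt agent_name
instance (agent_name : Option String) (out : List String) : Decidable (Spec_get_tools_for_agent agent_name out) := by unfold Spec_get_tools_for_agent; infer_instance

-- ===== CLAIM =====
def Claim_equal_get_tools_for_agent : Prop := ∀ (agent_name : Option String), Dom_get_tools_for_agent agent_name → Spec_get_tools_for_agent agent_name (get_tools_for_agent agent_name)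

-- ===== LEMMAS AND PROOFS =====

-- the inverted index, evaluated to a literal
theorem agent_to_tools_eval :
    AGENT_TO_TOOLS = PySem.Dict.mk
      [("terminal", ["terminal"]), ("browser_research", ["browser_research"]),
       ("file_modification", ["file_modification"]), ("diff_patch", ["diff_patch"]),
       ("tool_execution", ["tool_execution"])] := by decide

-- the registry's allowed_agents are already lowercase
theorem low_terminal : PySem.Str.lower "terminal" = "terminal" := by decide
theorem low_browser : PySem.Str.lower "browser_research" = "browser_research" := by decide
theorem low_file : PySem.Str.lower "file_modification" = "file_modification" := by decide
theorem low_diff : PySem.Str.lower "diff_patch" = "diff_patch" := by decide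
theorem low_tool : PySem.Str.lower "tool_execution" = "tool_execution" := by decide

-- core: for any normalized agent string, A's scan-and-sort = B's index lookup
theorem core_eq (agent : String) :
    PySem.List.sorted
      ((TOOL_REGISTRY.filter
          (fun p => (p.2.allowed_agents.map PySem.Str.lower).contains agent)).map
        (fun p => p.1)) (fun x => x)
    = AGENT_TO_TOOLS.getD agent [] := by
  rw [agent_to_tools_eval]
  by_cases h1 : agent = "terminal"
  · subst h1; decide
  by_cases h2 : agent = "browser_research"
  · subst h2; decide
  by_cases h3 : agent = "file_modification"
  · subst h3; decide
  by_cases h4 : agent = "diff_patch"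
  · subst h4; decide
  by_cases h5 : agent = "tool_execution"
  · subst h5; decide
  have g1 : ("terminal" : String) ≠ agent := fun h => h1 h.symm
  have g2 : ("browser_research" : String) ≠ agent := fun h => h2 h.symm
  have g3 : ("file_modification" : String) ≠ agent := fun h => h3 h.symm
  have g4 : ("diff_patch" : String) ≠ agent := fun h => h4 h.symm
  have g5 : ("tool_execution" : String) ≠ agent := fun h => h5 h.symm
  simp [TOOL_REGISTRY, List.filter, low_terminal, low_browser, low_file, low_diff, low_tool,
        PySem.Dict.getD, PySem.Dict.get?,
        g1, g2, g3, g4, g5, PySem.List.sorted]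

-- ===== VERDICT =====
theorem get_tools_for_agent_spec : Claim_equal_get_tools_for_agent := by
  intro agent_name _
  unfold Spec_get_tools_for_agent get_tools_for_agent get_tools_for_agent_alt
  match agent_name with
  | none => rfl
  | some s =>
    by_cases hs : s = ""
    · simp [hs]
    · simp only [if_neg hs]
      exact core_eq _
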